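-- pv_equiv track=rewrite | github.com/surpmh/algorithms | Programmers/level1/135808.py | solution
-- ===== SOURCE A (Python) =====
-- def solution(k, m, score):
--     score.sort(reverse=True)
--     answer = 0
--     box = []
--
--     for s in score:
--         box.append(s)
--
--         if len(box) == m:
--             answer += m * box.pop()
--             box = []
--
--     return answer
-- ===== SOURCE B (Python) =====
-- def solution(k, m, score):
--     score.sort(reverse=True)
--     if m <= 0:
--         return 0
--     return m * sum(score[m - 1::m])
-- ===== Notes on version B (the rewrite author's own statement) =====
-- stated objective: simpler
-- what changed: Replaces A's element-by-element loop with a buffer list (append, pop on full, reset) by a closed-form expression: after the in-place descending sort, the full groups' minima sit exactly at stride positions m-1, 2m-1, ..., so B returns m * sum(score[m-1::m]) with no loop or buffer; non-positive m returns 0 directly (A's loop never completes a group there).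
import Mathlib
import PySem

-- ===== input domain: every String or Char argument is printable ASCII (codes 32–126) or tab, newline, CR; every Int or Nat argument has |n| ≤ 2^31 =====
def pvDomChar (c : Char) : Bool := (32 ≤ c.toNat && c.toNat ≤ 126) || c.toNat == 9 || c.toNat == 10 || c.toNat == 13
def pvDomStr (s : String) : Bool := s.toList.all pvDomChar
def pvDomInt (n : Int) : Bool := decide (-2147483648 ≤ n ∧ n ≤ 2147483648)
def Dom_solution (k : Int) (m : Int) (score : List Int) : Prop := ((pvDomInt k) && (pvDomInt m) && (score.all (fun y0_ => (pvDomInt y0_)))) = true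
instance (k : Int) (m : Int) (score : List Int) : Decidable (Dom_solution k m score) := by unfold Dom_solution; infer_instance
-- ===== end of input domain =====

-- B replaces A's buffer loop by the closed-form stride slice m * sum(score[m-1::m]) ('simpler').
-- Both Pythons sort `score` in place (same side effect); the equivalence proved here is about the return value.

-- ===== PORT A =====
-- loop body: box.append(s); if len(box) == m: answer += m * box.pop(); box = []
def stepA (m : Int) (st : Int × List Int) (s : Int) : Int × List Int :=
  let box := st.2 ++ [s]
  if (box.length : Int) = m then (st.1 + m * box.getLastD 0, []) else (st.1, box)

def solution (k : Int) (m : Int) (score : List Int) : Int :=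
  ((PySem.List.sorted score (fun x => x) true).foldl (stepA m) (0, [])).1

-- ===== PORT B =====
-- m * sum(score[m-1::m]); the slice cannot fail since m ≠ 0 on this branch (step 0 is the only none)
def solution_alt (k : Int) (m : Int) (score : List Int) : Int :=
  let t := PySem.List.sorted score (fun x => x) true
  if m ≤ 0 then 0
  else m * ((PySem.List.slice? t (some (m - 1)) none m).getD []).sum

-- ===== PRECONDITION & SPEC =====
def Spec_solution (k : Int) (m : Int) (score : List Int) (out : Int) : Prop := out = solution_alt k m score
instance (k : Int) (m : Int) (score : List Int) (out : Int) : Decidable (Spec_solution k m score out) := by unfold Spec_solution; infer_instance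

-- ===== CLAIM (what is proved, stated in full; the proofs are below) =====
def Claim_equal_solution : Prop := ∀ (k : Int) (m : Int) (score : List Int), Dom_solution k m score → Spec_solution k m score (solution k m score)

-- ===== LEMMAS AND PROOFS =====

-- proof-side closed form: sum of the elements at positions m-1, 2m-1, … (the l.length / m full groups)
def strideSum (m : Nat) (l : List Int) : Int :=
  ((List.range (l.length / m)).map (fun j => l.getD ((m - 1) + m * j) 0)).sum

-- For m ≤ 0 the box never reaches length m, so the answer stays at its start value.
lemma foldA_nonpos (m : Int) (hm : m ≤ 0) (l : List Int) : ∀ (a : Int) (box : List Int),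
    (l.foldl (stepA m) (a, box)).1 = a := by
  induction l with
  | nil => intro a box; simp [List.foldl]
  | cons s t ih =>
      intro a box
      have hne : ¬ (((box ++ [s]).length : Int) = m) := by
        simp only [List.length_append, List.length_cons, List.length_nil]
        push_cast; omega
      simp only [List.foldl, stepA, if_neg hne]
      exact ih a (box ++ [s])

-- If the box plus the rest is too short to complete a group, the answer stays put.
lemma foldA_short (m : Nat) (l : List Int) : ∀ (a : Int) (box : List Int),
    box.length + l.length < m →
    (l.foldl (stepA (m : Int)) (a, box)).1 = a := by
  induction l with
  | nil => intro a box _; simp [List.foldl]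
  | cons s t ih =>
      intro a box h
      have hne : ¬ (((box ++ [s]).length : Int) = (m : Int)) := by
        simp only [List.length_append, List.length_cons, List.length_nil]
        push_cast
        simp only [List.length_cons] at h
        omega
      simp only [List.foldl, stepA, if_neg hne]
      exact ih a (box ++ [s]) (by simp_all; omega)

-- Filling the box up to m consumes m - box.length elements, adds m times the group's
-- last element (position m-1 of box ++ l), and resets the box.
lemma foldA_fill (m : Nat) (hm : 0 < m) (l : List Int) : ∀ (a : Int) (box : List Int),
    box.length < m → m ≤ box.length + l.length →
    (l.foldl (stepA (m : Int)) (a, box)).1 =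
      ((l.drop (m - box.length)).foldl (stepA (m : Int))
        (a + (m : Int) * ((box ++ l).getD (m - 1) 0), [])).1 := by
  induction l with
  | nil => intro a box hlt hge; simp at hge; omega
  | cons s t ih =>
      intro a box hlt hge
      by_cases hfull : ((box ++ [s]).length : Int) = (m : Int)
      · have hbl : box.length + 1 = m := by
          simp only [List.length_append, List.length_cons, List.length_nil] at hfull
          exact_mod_cast hfull
        have hdrop : (s :: t).drop (m - box.length) = t := by
          have : m - box.length = 1 := by omega
          simp [this]
        have hget : (box ++ s :: t).getD (m - 1) 0 = s := by
          have h1 : m - 1 = box.length := by omega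
          rw [h1]
          simp [List.getD]
        simp only [List.foldl, stepA, if_pos hfull, hdrop, hget]
        simp
      · have hbl : box.length + 1 ≠ m := by
          intro h; apply hfull
          simp only [List.length_append, List.length_cons, List.length_nil]
          push_cast; omega
        simp only [List.foldl, stepA, if_neg hfull]
        have h1 : (box ++ [s]).length < m := by
          simp only [List.length_append, List.length_cons, List.length_nil]; omega
        have h2 : m ≤ (box ++ [s]).length + t.length := by
          simp only [List.length_append, List.length_cons, List.length_nil]
          simp only [List.length_cons] at hge; omega
        rw [ih a (box ++ [s]) h1 h2]
        have hd : t.drop (m - (box ++ [s]).length) = (s :: t).drop (m - box.length) := by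
          have h3 : m - box.length = (m - (box.length + 1)) + 1 := by omega
          simp [List.length_append, h3]
        have hg : ((box ++ [s]) ++ t).getD (m - 1) 0 = (box ++ s :: t).getD (m - 1) 0 := by
          simp
        rw [hd, hg]

-- strideSum over a list of length ≥ m: first group's min plus strideSum of the rest.
lemma strideSum_chunk (m : Nat) (hm : 0 < m) (l : List Int) (hlen : m ≤ l.length) :
    strideSum m l = l.getD (m - 1) 0 + strideSum m (l.drop m) := by
  unfold strideSum
  have hlen' : (l.drop m).length = l.length - m := by simp
  rw [Nat.div_eq_sub_div hm hlen, hlen', List.range_succ_eq_map]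
  simp only [List.map_cons, List.map_map, List.sum_cons, Nat.mul_zero, Nat.add_zero]
  have hmap : List.map ((fun j => l.getD (m - 1 + m * j) 0) ∘ Nat.succ)
        (List.range ((l.length - m) / m))
      = List.map (fun j => (List.drop m l).getD (m - 1 + m * j) 0)
        (List.range ((l.length - m) / m)) := by
    apply List.map_congr_left
    intro j _
    simp only [Function.comp_apply, List.getD, List.getElem?_drop]
    have hidx : m - 1 + m * Nat.succ j = m + (m - 1 + m * j) := by rw [Nat.mul_succ]; omega
    rw [hidx]
  rw [hmap]

-- A's fold from an empty box computes m times the stride sum (strong induction on length).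
lemma foldA_eq_stride_aux (m : Nat) (hm : 0 < m) : ∀ (n : Nat), ∀ (l : List Int), l.length = n →
    ∀ (a : Int), (l.foldl (stepA (m : Int)) (a, [])).1 = a + (m : Int) * strideSum m l := by
  intro n
  induction n using Nat.strong_induction_on with
  | _ n ih =>
    intro l hlen a
    by_cases h : l.length < m
    · rw [foldA_short m l a [] (by simpa using h)]
      have hz : l.length / m = 0 := Nat.div_eq_of_lt h
      simp [strideSum, hz]
    · push_neg at h
      rw [foldA_fill m hm l a [] (by simpa using hm) (by simpa using h)]
      simp only [List.length_nil, Nat.sub_zero, List.nil_append]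
      have hd : (l.drop m).length < n := by simp; omega
      rw [ih _ hd (l.drop m) rfl]
      rw [strideSum_chunk m hm l h]
      ring

lemma foldA_eq_stride (m : Nat) (hm : 0 < m) (l : List Int) (a : Int) :
    (l.foldl (stepA (m : Int)) (a, [])).1 = a + (m : Int) * strideSum m l :=
  foldA_eq_stride_aux m hm l.length l rfl a

-- slice? with positive step m and start m-1 is exactly the stride positions.
lemma sliceB_eq_stride (m : Nat) (hm : 0 < m) (l : List Int) :
    ((PySem.List.slice? l (some ((m : Int) - 1)) none (m : Int)).getD []).sum = strideSum m l := by
  obtain ⟨M, rfl⟩ : ∃ M, m = M + 1 := ⟨m - 1, by omega⟩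
  have hm' : (0 : Int) < (M + 1 : Nat) := by exact_mod_cast hm
  unfold PySem.List.slice? PySem.List.sliceIndices
  simp only [if_neg hm'.ne', if_neg (not_lt.mpr hm'.le), if_pos hm',
    if_neg (show ¬(((M + 1 : Nat) : Int) - 1 < 0) by push_cast; omega)]
  by_cases hc : ((M + 1 : Nat) : Int) - 1 < (l.length : Int)
  · rw [min_eq_left (by omega)]
    simp only [if_pos hc]
    have hnum : (l.length : Int) - (((M + 1 : Nat) : Int) - 1) + ((M + 1 : Nat) : Int) - 1
        = (l.length : Int) := by ring
    rw [hnum]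
    have hq : ((l.length : Int) / ((M + 1 : Nat) : Int)).toNat = l.length / (M + 1) := by
      rw [← Int.natCast_div, Int.toNat_natCast]
    rw [hq]
    have hfm : List.filterMap (fun x : Nat => l[(((M + 1 : Nat) : Int) - 1 + ((M + 1 : Nat) : Int) * (x : Int)).toNat]?)
          (List.range (l.length / (M + 1)))
        = List.map (fun j => l.getD (M + (M + 1) * j) 0) (List.range (l.length / (M + 1))) := by
      rw [← List.filterMap_eq_map]
      apply List.filterMap_congr
      intro x hx
      have hxlt : x < l.length / (M + 1) := List.mem_range.mp hx
      have hb1 : M + (M + 1) * x < (M + 1) * (x + 1) := by rw [Nat.mul_succ]; omega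
      have hb2 : (M + 1) * (x + 1) ≤ (M + 1) * (l.length / (M + 1)) := Nat.mul_le_mul_left _ (by omega)
      have hb3 : (M + 1) * (l.length / (M + 1)) ≤ l.length := Nat.mul_div_le _ _
      have hbound : M + (M + 1) * x < l.length := by omega
      have htn : (((M + 1 : Nat) : Int) - 1 + ((M + 1 : Nat) : Int) * (x : Int)).toNat = M + (M + 1) * x := by
        have hcast : ((M + 1 : Nat) : Int) - 1 + ((M + 1 : Nat) : Int) * (x : Int)
            = ((M + (M + 1) * x : Nat) : Int) := by push_cast; ring
        rw [hcast, Int.toNat_natCast]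
      rw [htn, List.getElem?_eq_getElem hbound]
      exact congrArg some (List.getD_eq_getElem l 0 hbound).symm
    rw [hfm]
    simp [strideSum, Option.getD]
  · rw [min_eq_right (by omega)]
    simp only [lt_irrefl]
    have hz : l.length / (M + 1) = 0 := Nat.div_eq_of_lt (by push_cast at hc; omega)
    simp [strideSum, hz]


-- ===== VERDICT (by name: the statement is the Claim_ definition above) =====
theorem solution_spec : Claim_equal_solution := by
  intro k m score _
  unfold Spec_solution solution solution_alt
  by_cases hm : m ≤ 0
  · simp only [if_pos hm]
    exact foldA_nonpos m hm _ 0 []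
  · have hm' : 0 < m := by omega
    have hmn : m = (m.toNat : Int) := by omega
    simp only [if_neg hm]
    rw [hmn, foldA_eq_stride m.toNat (by omega) _ 0, sliceB_eq_stride m.toNat (by omega)]
    ring
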